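-- pv_equiv track=rewrite | github.com/gugolple/advent_of_code | 2024_python/p16/extended.py | remove_orient_seen
-- ===== SOURCE A (Python) =====
-- def remove_orient_seen(seen):
--     ns = dict()
--     for k, v in seen.items():
--         p, o = k
--         if p in ns and ns[p] < v:
--             continue
--         ns[p] = v
--     return ns
-- ===== SOURCE B (Python) =====
-- def remove_orient_seen(seen):
--     groups = {}
--     for (p, o), v in seen.items():
--         groups.setdefault(p, []).append(v)
--     return {p: min(vs) for p, vs in groups.items()}
-- ===== Notes on version B (the rewrite author's own statement) =====
-- stated objective: alternative
-- what changed: A keeps an online running minimum per position in one dict pass; B first groups all values by position into lists (a group-then-reduce over an intermediate table) and then takes min of each group in a second pass, preserving first-appearance key order.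
import Mathlib
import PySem

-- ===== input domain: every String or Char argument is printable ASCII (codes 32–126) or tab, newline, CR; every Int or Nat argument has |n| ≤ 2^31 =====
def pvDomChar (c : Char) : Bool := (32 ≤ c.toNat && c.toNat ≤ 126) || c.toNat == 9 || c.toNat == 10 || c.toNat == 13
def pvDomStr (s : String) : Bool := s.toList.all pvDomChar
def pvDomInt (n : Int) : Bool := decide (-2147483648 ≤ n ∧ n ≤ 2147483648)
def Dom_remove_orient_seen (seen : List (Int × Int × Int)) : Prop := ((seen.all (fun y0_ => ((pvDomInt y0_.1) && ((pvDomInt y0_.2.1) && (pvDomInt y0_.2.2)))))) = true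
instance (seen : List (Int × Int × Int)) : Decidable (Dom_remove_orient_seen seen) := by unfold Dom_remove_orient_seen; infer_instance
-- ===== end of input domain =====

-- B groups values by position into lists first and then takes the min of each group
-- (group-then-reduce), instead of A's online running-min dict pass; same cost, different decomposition.


-- ===== PORT A =====
-- 'p in ns and ns[p] < v: continue' — ported with get?: 'some w' iff p in ns
def remove_orient_seen (seen : List (Int × Int × Int)) : List (Int × Int) :=
  (seen.foldl (fun ns t =>
      match PySem.Dict.get? ns t.1 with
      | some w => if w < t.2.2 then ns else ns.insert t.1 t.2.2
      | none => ns.insert t.1 t.2.2)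
    PySem.Dict.empty).items

-- ===== PORT B =====
-- min(vs): every group list is nonempty by construction, so the none branch is unreachable
def pyMinInt (vs : List Int) : Int :=
  match PySem.List.min? vs (fun y => y) with
  | some m => m
  | none => 0

def remove_orient_seen_alt (seen : List (Int × Int × Int)) : List (Int × Int) :=
  let groups := seen.foldl (fun g t => g.modify t.1 [] (fun vs => vs ++ [t.2.2])) PySem.Dict.empty
  groups.items.map (fun pv => (pv.1, pyMinInt pv.2))

-- ===== PRECONDITION & SPEC =====
def Spec_remove_orient_seen (seen : List (Int × Int × Int)) (out : List (Int × Int)) : Prop := out = remove_orient_seen_alt seen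
instance (seen : List (Int × Int × Int)) (out : List (Int × Int)) : Decidable (Spec_remove_orient_seen seen out) := by unfold Spec_remove_orient_seen; infer_instance

-- ===== CLAIM (what is proved, stated in full; the proofs are below) =====
def Claim_equal_remove_orient_seen : Prop := ∀ (seen : List (Int × Int × Int)), Dom_remove_orient_seen seen → Spec_remove_orient_seen seen (remove_orient_seen seen)

-- ===== LEMMAS AND PROOFS =====

-- A's loop step, named for the lemmas
def stepA (ns : PySem.Dict Int Int) (t : Int × Int × Int) : PySem.Dict Int Int :=
  match PySem.Dict.get? ns t.1 with
  | some w => if w < t.2.2 then ns else ns.insert t.1 t.2.2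
  | none => ns.insert t.1 t.2.2

def stepB (g : PySem.Dict Int (List Int)) (t : Int × Int × Int) : PySem.Dict Int (List Int) :=
  g.modify t.1 [] (fun vs => vs ++ [t.2.2])

lemma remove_orient_seen_eq_stepA (seen : List (Int × Int × Int)) :
    remove_orient_seen seen = (seen.foldl stepA PySem.Dict.empty).items := rfl

lemma remove_orient_seen_alt_eq_stepB (seen : List (Int × Int × Int)) :
    remove_orient_seen_alt seen
      = (seen.foldl stepB PySem.Dict.empty).items.map (fun pv => (pv.1, pyMinInt pv.2)) := rfl

-- option-min: what one A-step does to the stored value at the touched key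
def omin (o : Option Int) (v : Int) : Option Int :=
  some (match o with | some w => min w v | none => v)

lemma get?_stepA (ns : PySem.Dict Int Int) (t : Int × Int × Int) (p : Int) :
    (stepA ns t).get? p = if p = t.1 then omin (ns.get? t.1) t.2.2 else ns.get? p := by
  unfold stepA omin
  by_cases hp : p = t.1
  · subst hp
    rcases h : ns.get? t.1 with _ | w
    · simp [PySem.Dict.get?_insert_self]
    · by_cases hw : w < t.2.2
      · simp [h, hw, min_eq_left (le_of_lt hw)]
      · simp [hw, PySem.Dict.get?_insert_self, min_eq_right (le_of_not_gt hw)]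
  · rcases h : ns.get? t.1 with _ | w
    · simp [PySem.Dict.get?_insert, hp]
    · by_cases hw : w < t.2.2
      · simp [hw, hp]
      · simp [hw, PySem.Dict.get?_insert, hp]

lemma get?_foldA (l : List (Int × Int × Int)) (d : PySem.Dict Int Int) (p : Int) :
    (l.foldl stepA d).get? p
      = ((l.filter (fun t => t.1 == p)).map (fun t => t.2.2)).foldl omin (d.get? p) := by
  induction l generalizing d with
  | nil => rfl
  | cons t l ih =>
    simp only [List.foldl_cons, ih, List.filter_cons]
    by_cases hp : t.1 = p
    · simp [get?_stepA, hp]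
    · have hp' : ¬ p = t.1 := fun h => hp h.symm
      simp [get?_stepA, hp, hp']

lemma getD_foldB (l : List (Int × Int × Int)) (g : PySem.Dict Int (List Int)) (p : Int) :
    (l.foldl stepB g).getD p []
      = g.getD p [] ++ (l.filter (fun t => t.1 == p)).map (fun t => t.2.2) := by
  induction l generalizing g with
  | nil => simp
  | cons t l ih =>
    simp only [List.foldl_cons, ih, List.filter_cons]
    by_cases hp : t.1 = p
    · simp [stepB, hp]
    · have hp' : ¬ p = t.1 := fun h => hp h.symm
      simp [stepB, hp, hp', PySem.Dict.getD_modify]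

lemma keys_foldA (l : List (Int × Int × Int)) (d : PySem.Dict Int Int) :
    (l.foldl stepA d).keys = PySem.Set.update d.keys (l.map (fun t => t.1)) := by
  induction l generalizing d with
  | nil => simp [PySem.Set.update_nil]
  | cons t l ih =>
    simp only [List.foldl_cons, List.map_cons, PySem.Set.update_cons, ih]
    congr 1
    unfold stepA
    rcases h : d.get? t.1 with _ | w <;> dsimp only
    · have hc : d.contains t.1 = false := by
        rw [PySem.Dict.contains_eq_isSome_get?, h]; rfl
      have hm : t.1 ∉ d.keys := by
        rw [← PySem.Dict.get?_eq_none_iff_not_mem_keys]; exact h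
      rw [PySem.Dict.keys_insert_of_not_contains d t.2.2 hc, PySem.Set.add_of_not_mem hm]
    · have hm : t.1 ∈ d.keys := by
        by_contra hm
        rw [← PySem.Dict.get?_eq_none_iff_not_mem_keys] at hm
        simp [h] at hm
      have hc : d.contains t.1 = true := by
        rw [PySem.Dict.contains_eq_isSome_get?, h]; rfl
      by_cases hw : w < t.2.2
      · rw [if_pos hw, PySem.Set.add_of_mem hm]
      · rw [if_neg hw, PySem.Dict.keys_insert_of_contains d t.2.2 hc, PySem.Set.add_of_mem hm]


lemma nodup_keys_foldA (l : List (Int × Int × Int)) (d : PySem.Dict Int Int)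
    (h : d.keys.Nodup) : (l.foldl stepA d).keys.Nodup := by
  induction l generalizing d with
  | nil => exact h
  | cons t l ih =>
    apply ih
    unfold stepA
    rcases d.get? t.1 with _ | w <;> dsimp only
    · exact PySem.Dict.nodup_keys_insert _ _ _ h
    · by_cases hw : w < t.2.2
      · simpa [hw]
      · simpa [hw] using PySem.Dict.nodup_keys_insert _ _ _ h

lemma foldl_omin_some (l : List Int) (a : Int) :
    l.foldl omin (some a) = some (l.foldl min a) := by
  induction l generalizing a with
  | nil => rfl
  | cons x l ih => simp [omin, ih]

-- ===== VERDICT (by name: the statement is the Claim_ definition above) =====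
theorem remove_orient_seen_spec : Claim_equal_remove_orient_seen := by
  intro seen _
  unfold Spec_remove_orient_seen
  rw [remove_orient_seen_eq_stepA, remove_orient_seen_alt_eq_stepB]
  have hndA : (seen.foldl stepA PySem.Dict.empty).keys.Nodup :=
    nodup_keys_foldA _ _ PySem.Dict.nodup_keys_empty
  have hndB : (seen.foldl stepB PySem.Dict.empty).keys.Nodup :=
    PySem.Dict.nodup_keys_foldl_modify_key seen (fun t => t.1) []
      (fun g t vs => vs ++ [t.2.2]) PySem.Dict.empty PySem.Dict.nodup_keys_empty
  have hkB : (seen.foldl stepB PySem.Dict.empty).keys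
      = PySem.Set.update (PySem.Dict.empty : PySem.Dict Int (List Int)).keys
          (seen.map (fun t => t.1)) :=
    PySem.Dict.keys_foldl_modify_key seen (fun t => t.1) []
      (fun g t vs => vs ++ [t.2.2]) PySem.Dict.empty
  have hkeys : (seen.foldl stepA PySem.Dict.empty).keys
      = (seen.foldl stepB PySem.Dict.empty).keys := by
    rw [keys_foldA, hkB]
    simp [PySem.Dict.keys_empty]
  rw [PySem.Dict.items_eq_map_keys _ hndA 0, PySem.Dict.items_eq_map_keys _ hndB [],
    List.map_map, hkeys]
  apply List.map_congr_left
  intro p hp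
  simp only [Function.comp]
  congr 1
  -- p occurs as a key of seen, so its group of values is nonempty
  have hpmem : p ∈ seen.map (fun t => t.1) := by
    rw [hkB] at hp
    have := (PySem.Set.mem_update _ _ _).mp hp
    simpa [PySem.Dict.keys_empty] using this
  obtain ⟨t, ht, hteq⟩ := List.mem_map.mp hpmem
  have hne : (seen.filter (fun t => t.1 == p)).map (fun t => t.2.2) ≠ [] := by
    simp only [ne_eq, List.map_eq_nil_iff, List.filter_eq_nil_iff, not_forall]
    exact ⟨t, ht, by simp [hteq]⟩
  rcases hvs : (seen.filter (fun t => t.1 == p)).map (fun t => t.2.2) with _ | ⟨x, vs⟩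
  · exact absurd hvs hne
  · have hA : (seen.foldl stepA PySem.Dict.empty).getD p 0 = vs.foldl min x := by
      rw [PySem.Dict.getD_eq_get?_getD, get?_foldA, PySem.Dict.get?_empty, hvs,
        List.foldl_cons, show omin none x = some x from rfl, foldl_omin_some]
      rfl
    have hB : (seen.foldl stepB PySem.Dict.empty).getD p [] = x :: vs := by
      rw [getD_foldB, PySem.Dict.getD_empty, hvs]; rfl
    rw [hA, hB]
    unfold pyMinInt
    rw [PySem.List.min?_id_cons]
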